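-- pv_equiv track=rewrite | github.com/tikeeva/pycodon | codon/utils.py | make_multisequence
-- ===== SOURCE A (Python) =====
-- from typing import Dict, List, Tuple
-- from itertools import product
--
-- def make_multisequence(levels: List[List[int]], content: Dict[int, str]) -> List[str]:
--     paths: Tuple[Tuple[int, ...]] = tuple(product(*levels))
--     multisequence: List[str] = []
--     for i, path in enumerate(paths):
--         multisequence.append('')
--         for node in path:
--             multisequence[i] += content[node]
--     return multisequence
-- ===== SOURCE B (Python) =====
-- from typing import Dict, List
--
-- def make_multisequence(levels: List[List[int]], content: Dict[int, str]) -> List[str]: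
--     # an empty level makes the Cartesian product empty: no paths, no lookups
--     if not all(levels):
--         return []
--     result: List[str] = ['']
--     for level in levels:
--         result = [prefix + content[node] for prefix in result for node in level]
--     return result
-- ===== Notes on version B (the rewrite author's own statement) =====
-- stated objective: simpler
-- what changed: Builds the result incrementally as a prefix list extended level by level (with an early [] return when a level is empty, since the product is then empty), instead of materialising the full Cartesian product with itertools.product and then concatenating along each path.
import Mathlib
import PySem

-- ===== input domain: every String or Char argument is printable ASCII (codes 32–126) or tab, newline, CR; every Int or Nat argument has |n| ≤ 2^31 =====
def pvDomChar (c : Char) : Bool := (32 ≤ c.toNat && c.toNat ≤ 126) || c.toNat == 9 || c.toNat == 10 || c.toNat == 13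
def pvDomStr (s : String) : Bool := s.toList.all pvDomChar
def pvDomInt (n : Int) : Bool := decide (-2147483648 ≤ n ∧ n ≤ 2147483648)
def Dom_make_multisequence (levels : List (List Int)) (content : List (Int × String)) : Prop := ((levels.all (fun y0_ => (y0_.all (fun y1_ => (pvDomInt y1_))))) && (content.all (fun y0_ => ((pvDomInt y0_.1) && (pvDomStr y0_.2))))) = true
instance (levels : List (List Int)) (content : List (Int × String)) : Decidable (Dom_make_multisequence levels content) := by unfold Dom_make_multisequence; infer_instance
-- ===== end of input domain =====

-- B replaces the itertools.product materialisation of A with an incremental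
-- prefix-list build, one level at a time (simpler decomposition, same cost).


-- ===== PORT A =====
-- itertools.product(*levels), last level varies fastest
def pyProduct : List (List Int) → List (List Int)
  | [] => [[]]
  | l :: ls => l.flatMap (fun x => (pyProduct ls).map (fun p => x :: p))

def make_multisequence (levels : List (List Int)) (content : List (Int × String)) : List String :=
  let paths := pyProduct levels
  -- for each path: append '', then '+=' content[node] per node
  -- content[node] ported as getD with default ""; the KeyError case is excluded by Pre_
  paths.foldl (fun ms path =>
    ms ++ [path.foldl (fun s node => s ++ PySem.Dict.getD (PySem.Dict.mk content) node "") ""]) []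

-- ===== PORT B =====
def make_multisequence_alt (levels : List (List Int)) (content : List (Int × String)) : List String :=
  -- 'if not all(levels): return []'
  if levels.any (fun l => l.isEmpty) then []
  else
    levels.foldl (fun result level =>
      result.flatMap (fun pfx => level.map (fun node => pfx ++ PySem.Dict.getD (PySem.Dict.mk content) node ""))) [""]

-- ===== PRECONDITION & SPEC =====
-- A (and B) raise KeyError exactly when every level is nonempty and some node of
-- some level is not a key of content; Pre_ excludes exactly those inputs.
def Pre_make_multisequence (levels : List (List Int)) (content : List (Int × String)) : Prop :=
  (∃ l ∈ levels, l = []) ∨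
    (∀ l ∈ levels, ∀ n ∈ l, PySem.Dict.contains (PySem.Dict.mk content) n = true)
instance (levels : List (List Int)) (content : List (Int × String)) : Decidable (Pre_make_multisequence levels content) := by unfold Pre_make_multisequence; infer_instance

def pvWitness_make_multisequence : List (List Int) × (List (Int × String)) :=
  ([[1, 2], [3]], [(1, "a"), (2, "b"), (3, "c")])

def Spec_make_multisequence (levels : List (List Int)) (content : List (Int × String)) (out : List String) : Prop := out = make_multisequence_alt levels content
instance (levels : List (List Int)) (content : List (Int × String)) (out : List String) : Decidable (Spec_make_multisequence levels content out) := by unfold Spec_make_multisequence; infer_instance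

-- ===== CLAIM (what is proved, stated in full; the proofs are below) =====
def Claim_equal_make_multisequence : Prop := ∀ (levels : List (List Int)) (content : List (Int × String)), Dom_make_multisequence levels content → Pre_make_multisequence levels content → Spec_make_multisequence levels content (make_multisequence levels content)

-- ===== LEMMAS AND PROOFS =====

-- B's level-by-level fold equals mapping the path fold over the full product.
theorem foldl_flatMap_eq_product_map (g : String → Int → String) :
    ∀ (levels : List (List Int)) (acc : List String),
      levels.foldl (fun result level =>
          result.flatMap (fun p => level.map (fun n => g p n))) acc
      = acc.flatMap (fun p => (pyProduct levels).map (fun path => path.foldl g p)) := by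
  intro levels
  induction levels with
  | nil =>
    intro acc
    simp [pyProduct]
  | cons l ls ih =>
    intro acc
    simp only [List.foldl_cons, ih, pyProduct]
    simp [List.flatMap_assoc, List.map_flatMap, List.flatMap_map, Function.comp_def]

-- an empty level empties the product
theorem pyProduct_eq_nil_of_mem_nil :
    ∀ (levels : List (List Int)), [] ∈ levels → pyProduct levels = [] := by
  intro levels
  induction levels with
  | nil => intro h; cases h
  | cons l ls ih =>
    intro h
    rcases List.mem_cons.mp h with h | h
    · simp [pyProduct, ← h]
    · simp [pyProduct, ih h]

theorem make_multisequence_spec : Claim_equal_make_multisequence := by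
  intro levels content _ _
  unfold Spec_make_multisequence make_multisequence make_multisequence_alt
  by_cases he : levels.any (fun l => l.isEmpty)
  · have : ([] : List Int) ∈ levels := by
      rcases List.any_eq_true.mp he with ⟨l, hl, hl'⟩
      simpa [List.isEmpty_iff.mp (by simpa using hl')] using hl
    simp [he, pyProduct_eq_nil_of_mem_nil levels this]
  · simp only [he]
    rw [foldl_flatMap_eq_product_map]
    simp only [PySem.List.foldl_append_singleton_eq_map, List.nil_append]
    simp
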